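-- pv_equiv track=rewrite | github.com/SheepHappen/rh_code_clean_full | report/views.py | get_material_risk_source
-- ===== SOURCE A (Python) =====
-- def get_material_risk_source(material_risks):
--     obj = {}
--     for risk in material_risks:
--         if risk['source'] in obj.keys():
--             obj[risk['source']].extend([risk['name']])
--         else:
--             obj[risk['source']] = [risk['name']]
--     return obj
-- ===== SOURCE B (Python) =====
-- def get_material_risk_source(material_risks):
--     # Different decomposition: collect (source, name) pairs once, compute the
--     # first-appearance key order, then build each group with a per-key scan.
--     pairs = [(risk['source'], risk['name']) for risk in material_risks]
--     order = []
--     for src, _ in pairs: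
--         if src not in order:
--             order.append(src)
--     return {src: [name for s, name in pairs if s == src] for src in order}
-- ===== Notes on version B (the rewrite author's own statement) =====
-- stated objective: alternative
-- what changed: Replaces A's single membership-checking dict-accumulation loop by a two-phase plan: build the (source, name) pair list, compute the first-appearance key order, then construct each group by a separate filtering pass per key.
import Mathlib
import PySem

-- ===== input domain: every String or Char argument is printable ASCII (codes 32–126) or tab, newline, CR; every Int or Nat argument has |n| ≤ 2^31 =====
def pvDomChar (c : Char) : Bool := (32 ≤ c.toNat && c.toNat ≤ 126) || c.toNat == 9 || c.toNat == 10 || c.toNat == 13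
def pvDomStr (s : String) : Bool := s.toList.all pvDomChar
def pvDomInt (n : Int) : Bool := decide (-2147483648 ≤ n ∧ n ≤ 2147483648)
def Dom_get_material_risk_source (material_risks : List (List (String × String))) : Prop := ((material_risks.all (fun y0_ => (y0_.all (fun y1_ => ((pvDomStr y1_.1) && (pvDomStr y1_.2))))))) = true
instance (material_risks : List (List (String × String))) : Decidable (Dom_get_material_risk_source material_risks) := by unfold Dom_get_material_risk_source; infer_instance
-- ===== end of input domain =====

-- B regroups via a pair list, a first-appearance key order and one filtering pass per key,
-- instead of A's single membership-checking dict-accumulation loop (objective: alternative).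

-- ===== PORT A =====
-- both ports share only the raising dict lookup risk[k]: first-match lookup; "" only outside Pre_ (KeyError excluded there)
def pvVal (r : List (String × String)) (k : String) : String := (r.lookup k).getD ""

-- Port of A: one dict-accumulation loop, membership test then extend-or-insert
def get_material_risk_source (material_risks : List (List (String × String))) : List (String × List String) :=
  (material_risks.foldl
    (fun obj risk =>
      if obj.contains (pvVal risk "source") then
        obj.modify (pvVal risk "source") [] (· ++ [pvVal risk "name"])
      else
        obj.insert (pvVal risk "source") [pvVal risk "name"])
    PySem.Dict.empty).items

-- ===== PORT B =====
-- Port of B: pair list, first-appearance key order, then one filtering pass per key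
def get_material_risk_source_alt (material_risks : List (List (String × String))) : List (String × List String) :=
  let pairs := material_risks.map (fun risk => (pvVal risk "source", pvVal risk "name"))
  let order := pairs.foldl (fun acc p => if p.1 ∈ acc then acc else acc ++ [p.1]) ([] : List String)
  order.map (fun src => (src, (pairs.filter (fun p => p.1 == src)).map (·.2)))

-- ===== PRECONDITION & SPEC =====
-- Pre_: every risk dict has the keys "source" and "name"; otherwise Python A raises KeyError.
def Pre_get_material_risk_source (material_risks : List (List (String × String))) : Prop :=
  ∀ risk ∈ material_risks, (risk.lookup "source").isSome = true ∧ (risk.lookup "name").isSome = true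
instance (material_risks : List (List (String × String))) : Decidable (Pre_get_material_risk_source material_risks) := by unfold Pre_get_material_risk_source; infer_instance
def pvWitness_get_material_risk_source : (List (List (String × String))) :=
  [[("source", "ops"), ("name", "fire")], [("source", "ops"), ("name", "flood")]]
def Spec_get_material_risk_source (material_risks : List (List (String × String))) (out : List (String × List String)) : Prop := out = get_material_risk_source_alt material_risks
instance (material_risks : List (List (String × String))) (out : List (String × List String)) : Decidable (Spec_get_material_risk_source material_risks out) := by unfold Spec_get_material_risk_source; infer_instance

-- ===== CLAIM (what is proved, stated in full; the proofs are below) =====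
def Claim_equal_get_material_risk_source : Prop := ∀ (material_risks : List (List (String × String))), Dom_get_material_risk_source material_risks → Pre_get_material_risk_source material_risks → Spec_get_material_risk_source material_risks (get_material_risk_source material_risks)

-- ===== LEMMAS AND PROOFS =====

-- A's extend-or-insert branch is exactly an unconditional modify
theorem pv_step_eq (d : PySem.Dict String (List String)) (s n : String) :
    (if d.contains s then d.modify s [] (· ++ [n]) else d.insert s [n])
      = d.modify s [] (· ++ [n]) := by
  by_cases h : d.contains s = true
  · simp [h]
  · simp only [Bool.not_eq_true] at h
    simp [h, PySem.Dict.modify, PySem.Dict.getD_of_not_contains]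

-- B's order loop is the ordered dedup of the sources
theorem pv_order_pairs (ps : List (String × String)) :
    ps.foldl (fun acc p => if p.1 ∈ acc then acc else acc ++ [p.1]) ([] : List String)
      = PySem.Set.ofList (ps.map Prod.fst) := by
  have h : (PySem.Set.add : PySem.Set String → String → PySem.Set String)
      = fun acc x => if x ∈ acc then acc else acc ++ [x] := by
    funext acc x; simp [PySem.Set.add, PySem.Set.contains]
  rw [PySem.Set.ofList_eq_foldl, List.foldl_map, h]

-- the common grouped form of both ports, over the pair list
theorem pv_group (ps : List (String × String)) :
    (ps.foldl (fun d p => d.modify p.1 [] (· ++ [p.2])) PySem.Dict.empty).items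
      = (ps.foldl (fun acc p => if p.1 ∈ acc then acc else acc ++ [p.1]) ([] : List String)).map
          (fun src => (src, (ps.filter (fun p => p.1 == src)).map (·.2))) := by
  have hnodup : (ps.foldl (fun d p => d.modify p.1 [] (· ++ [p.2])) PySem.Dict.empty).keys.Nodup :=
    PySem.Dict.nodup_keys_foldl_modify_key ps Prod.fst [] (fun d p => (· ++ [p.2]))
      PySem.Dict.empty PySem.Dict.nodup_keys_empty
  have hkeys : (ps.foldl (fun d p => d.modify p.1 [] (· ++ [p.2])) PySem.Dict.empty).keys
      = PySem.Set.ofList (ps.map Prod.fst) := by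
    rw [PySem.Dict.keys_foldl_modify_key, PySem.Dict.keys_empty, PySem.Set.update_nil_left]
  rw [PySem.Dict.items_eq_map_keys _ hnodup [], hkeys, pv_order_pairs]
  apply List.map_congr_left
  intro k _
  rw [PySem.Dict.getD_foldl_modify_append, PySem.Dict.getD_empty, List.nil_append]

-- A's dict loop, rewritten over the pair list
theorem pv_A_eq (material_risks : List (List (String × String))) :
    get_material_risk_source material_risks
      = ((material_risks.map (fun risk => (pvVal risk "source", pvVal risk "name"))).foldl
          (fun d p => d.modify p.1 [] (· ++ [p.2])) PySem.Dict.empty).items := by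
  unfold get_material_risk_source
  rw [List.foldl_map]
  have hf : (fun (obj : PySem.Dict String (List String)) risk =>
      if obj.contains (pvVal risk "source") then
        obj.modify (pvVal risk "source") [] (· ++ [pvVal risk "name"])
      else
        obj.insert (pvVal risk "source") [pvVal risk "name"])
    = fun obj risk => obj.modify (pvVal risk "source") [] (· ++ [pvVal risk "name"]) := by
    funext d r; exact pv_step_eq d (pvVal r "source") (pvVal r "name")
  rw [hf]

theorem pv_main (material_risks : List (List (String × String))) :
    get_material_risk_source material_risks = get_material_risk_source_alt material_risks :=
  (pv_A_eq material_risks).trans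
    (pv_group (material_risks.map (fun risk => (pvVal risk "source", pvVal risk "name"))))

-- ===== VERDICT (by name: the statement is the Claim_ definition above) =====
theorem get_material_risk_source_spec : Claim_equal_get_material_risk_source := by
  intro material_risks _ _
  unfold Spec_get_material_risk_source
  exact pv_main material_risks
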